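-- pv_equiv track=rewrite | github.com/Flowing8175/persbot | soyebot/bot/session.py | _split_history_by_indices
-- ===== SOURCE A (Python) =====
-- def _split_history_by_indices(history: list, indices_to_remove: set) -> tuple:
--     """Split history into kept and removed messages."""
--     new_history = []
--     removed = []
--     for i, msg in enumerate(history):
--         if i in indices_to_remove:
--             removed.append(msg)
--         else:
--             new_history.append(msg)
--     return new_history, removed
-- ===== SOURCE B (Python) =====
-- def _split_history_by_indices(history: list, indices_to_remove: set) -> tuple:
--     """Split history into kept and removed messages."""
--     n = len(history)
--     new_history = [msg for i, msg in enumerate(history) if i not in indices_to_remove]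
--     removed = [history[i] for i in sorted(indices_to_remove) if 0 <= i < n]
--     return new_history, removed
-- ===== Notes on version B (the rewrite author's own statement) =====
-- stated objective: alternative
-- what changed: Instead of one loop over enumerate(history) appending to both output lists, B builds the kept list with a comprehension over history and builds the removed list by traversing the sorted index set directly, indexing into history with a range guard.
import Mathlib
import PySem

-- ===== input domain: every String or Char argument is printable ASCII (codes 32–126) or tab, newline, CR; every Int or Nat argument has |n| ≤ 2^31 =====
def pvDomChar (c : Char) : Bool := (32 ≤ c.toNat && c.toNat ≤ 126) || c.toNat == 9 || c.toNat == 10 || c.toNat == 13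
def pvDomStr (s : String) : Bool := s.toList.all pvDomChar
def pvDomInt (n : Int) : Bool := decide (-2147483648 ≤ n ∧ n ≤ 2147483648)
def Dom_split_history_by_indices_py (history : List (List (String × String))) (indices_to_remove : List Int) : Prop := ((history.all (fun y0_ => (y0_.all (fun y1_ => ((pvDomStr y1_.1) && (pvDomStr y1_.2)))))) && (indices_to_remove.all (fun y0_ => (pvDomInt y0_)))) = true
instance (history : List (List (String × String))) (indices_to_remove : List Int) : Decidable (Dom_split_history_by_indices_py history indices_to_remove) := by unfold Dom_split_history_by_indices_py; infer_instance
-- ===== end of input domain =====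

-- B replaces A's single partition loop by a comprehension for the kept messages and a
-- traversal of the sorted index set (with a range guard) for the removed ones (objective: alternative).

-- ===== PORT A =====
-- one loop over enumerate(history), appending to new_history or removed
def split_history_by_indices_py (history : List (List (String × String))) (indices_to_remove : List Int) : (List (List (String × String))) × (List (List (String × String))) :=
  (PySem.List.enumerate history 0).foldl
    (fun s im =>
      if indices_to_remove.contains im.1 then (s.1, s.2 ++ [im.2])
      else (s.1 ++ [im.2], s.2))
    ([], [])

-- ===== PORT B =====
-- kept = [msg for i, msg in enumerate(history) if i not in indices_to_remove]
-- removed = [history[i] for i in sorted(indices_to_remove) if 0 <= i < n]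
-- (pyGetD's default is never used: the guard keeps i in range)
def split_history_by_indices_py_alt (history : List (List (String × String))) (indices_to_remove : List Int) : (List (List (String × String))) × (List (List (String × String))) :=
  let n : Int := history.length
  let new_history := ((PySem.List.enumerate history 0).filter
      (fun im => !(indices_to_remove.contains im.1))).map (·.2)
  let removed := ((PySem.List.sorted indices_to_remove (fun x => x) false).filter
      (fun i => decide (0 ≤ i) && decide (i < n))).map (fun i => PySem.List.pyGetD history i [])
  (new_history, removed)

-- ===== PRECONDITION & SPEC =====
-- indices_to_remove encodes a Python set, so its List Int representation holds distinct
-- elements; Pre_ states exactly that (a list with duplicates corresponds to no Python input).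
def Pre_split_history_by_indices_py (history : List (List (String × String))) (indices_to_remove : List Int) : Prop :=
  indices_to_remove.Nodup
instance (history : List (List (String × String))) (indices_to_remove : List Int) : Decidable (Pre_split_history_by_indices_py history indices_to_remove) := by unfold Pre_split_history_by_indices_py; infer_instance

def pvWitness_split_history_by_indices_py : (List (List (String × String))) × List Int :=
  ([[("role", "user"), ("content", "hi")], [("role", "bot")]], [0, 5, -1])

def Spec_split_history_by_indices_py (history : List (List (String × String))) (indices_to_remove : List Int) (out : (List (List (String × String))) × (List (List (String × String)))) : Prop := out = split_history_by_indices_py_alt history indices_to_remove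
instance (history : List (List (String × String))) (indices_to_remove : List Int) (out : (List (List (String × String))) × (List (List (String × String)))) : Decidable (Spec_split_history_by_indices_py history indices_to_remove out) := by unfold Spec_split_history_by_indices_py; infer_instance

-- ===== CLAIM (what is proved, stated in full; the proofs are below) =====
def Claim_equal_split_history_by_indices_py : Prop := ∀ (history : List (List (String × String))) (indices_to_remove : List Int), Dom_split_history_by_indices_py history indices_to_remove → Pre_split_history_by_indices_py history indices_to_remove → Spec_split_history_by_indices_py history indices_to_remove (split_history_by_indices_py history indices_to_remove)

-- ===== LEMMAS AND PROOFS =====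

-- A's loop, characterised: the pair fold is two filters of enumerate.
theorem foldA_eq {α : Type} (l : List (Int × α)) (idx : List Int) (a b : List α) :
    l.foldl (fun (s : List α × List α) im =>
        if idx.contains im.1 then (s.1, s.2 ++ [im.2]) else (s.1 ++ [im.2], s.2)) (a, b)
      = (a ++ (l.filter (fun im => !(idx.contains im.1))).map (·.2),
         b ++ (l.filter (fun im => idx.contains im.1)).map (·.2)) := by
  induction l generalizing a b with
  | nil => simp
  | cons x xs ih =>
    rw [List.foldl_cons]
    by_cases h : x.1 ∈ idx
    · rw [if_pos (by simpa using h), ih]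
      simp [h]
    · rw [if_neg (by simpa using h), ih]
      simp [h]

theorem pairwise_lt_of_le_nodup (l : List Int)
    (h1 : l.Pairwise (· ≤ ·)) (h2 : l.Nodup) : l.Pairwise (· < ·) := by
  have := List.Pairwise.and h1 h2
  exact this.imp (fun h => lt_of_le_of_ne h.1 h.2)

-- the indices B visits are exactly the indices A removes at, in the same (increasing) order
theorem sorted_filter_eq_fsts (history : List (List (String × String))) (idx : List Int)
    (hnd : idx.Nodup) :
    (PySem.List.sorted idx (fun x => x) false).filter
        (fun i => decide (0 ≤ i) && decide (i < (history.length : Int)))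
      = ((PySem.List.enumerate history 0).filter (fun im => idx.contains im.1)).map (·.1) := by
  set p : Int → Bool := fun i => decide (0 ≤ i) && decide (i < (history.length : Int)) with hp
  set L := (PySem.List.sorted idx (fun x => x) false).filter p with hL
  set M := ((PySem.List.enumerate history 0).filter (fun im => idx.contains im.1)).map (·.1) with hM
  -- both are strictly increasing
  have hLlt : L.Pairwise (· < ·) := by
    apply pairwise_lt_of_le_nodup
    · exact List.Pairwise.filter p (PySem.List.sorted_pairwise idx (fun x => x))
    · exact (((PySem.List.sorted_perm idx (fun x => x) false).nodup_iff).mpr hnd).filter p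
  have hMlt : M.Pairwise (· < ·) := by
    apply List.Pairwise.map
    · exact fun a b (h : a.1 < b.1) => h
    · exact List.Pairwise.filter _ (PySem.List.pairwise_lt_enumerate history 0)
  -- same members
  have hmem : ∀ i : Int, i ∈ M ↔ i ∈ L := by
    intro i
    rw [hL, hM]
    simp only [List.mem_filter, PySem.List.mem_sorted, List.mem_map, hp,
      Bool.and_eq_true, decide_eq_true_eq]
    constructor
    · rintro ⟨im, ⟨him, hc⟩, rfl⟩
      rw [PySem.List.mem_enumerate_iff] at him
      obtain ⟨k, hk, rfl⟩ := him
      refine ⟨by simpa using hc, by simp <;> omega⟩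
    · rintro ⟨hi, h0, hn⟩
      refine ⟨(i.toNat, history[i.toNat]'(by omega)), ⟨?_, ?_⟩, by simp <;> omega⟩
      · rw [PySem.List.mem_enumerate_iff]
        exact ⟨i.toNat, by omega, by simp <;> omega⟩
      · simpa [show ((i.toNat : Int)) = i by omega] using hi
  -- two strictly increasing lists with equal membership are equal
  have hnM : M.Nodup := hMlt.imp (fun h => ne_of_lt h)
  have hperm : M.Perm L := by
    rw [List.perm_ext_iff_of_nodup hnM (hLlt.imp (fun h => ne_of_lt h))]
    exact hmem
  have h1 : PySem.List.sorted L (fun x => x) false = M :=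
    PySem.List.sorted_eq_of_perm_of_pairwise_lt L M (fun x => x) hperm hMlt
  have h2 : PySem.List.sorted L (fun x => x) false = L :=
    PySem.List.sorted_eq_self_of_pairwise L (fun x => x) (hLlt.imp (fun h => le_of_lt h))
  rw [← h2, h1]

-- reading history back at those indices gives the removed messages themselves
theorem map_get_fsts (history : List (List (String × String))) (idx : List Int) :
    (((PySem.List.enumerate history 0).filter (fun im => idx.contains im.1)).map (·.1)).map
        (fun i => PySem.List.pyGetD history i [])
      = ((PySem.List.enumerate history 0).filter (fun im => idx.contains im.1)).map (·.2) := by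
  rw [List.map_map]
  apply List.map_congr_left
  intro im him
  have him' := (List.mem_filter.mp him).1
  rw [PySem.List.mem_enumerate_iff] at him'
  obtain ⟨k, hk, rfl⟩ := him'
  simp [PySem.List.pyGetD_natCast, List.getD_eq_getElem?_getD, hk]

-- ===== VERDICT (by name: the statement is the Claim_ definition above) =====
theorem split_history_by_indices_py_spec : Claim_equal_split_history_by_indices_py := by
  intro history idx _ hpre
  unfold Spec_split_history_by_indices_py split_history_by_indices_py split_history_by_indices_py_alt
  rw [foldA_eq]
  simp only [List.nil_append]
  rw [sorted_filter_eq_fsts history idx hpre, map_get_fsts]
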